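-- pv_equiv track=rewrite | github.com/kjh618/problem-solving | Baekjoon/1700.py | get_elem_max_first
-- ===== SOURCE A (Python) =====
-- def get_elem_max_first(lst, start, elems):
--     max_first, elem_max_first = -1, None
--     for elem in elems:
--         try:
--             first = lst.index(elem, start)
--         except ValueError:
--             return elem
--         if first > max_first:
--             max_first, elem_max_first = first, elem
--     return elem_max_first
-- ===== SOURCE B (Python) =====
-- def get_elem_max_first(lst, start, elems):
--     remaining = set(elems)
--     last_found = None
--     for value in lst[start:]:
--         if value in remaining:
--             remaining.discard(value)
--             last_found = value
--     for e in elems: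
--         if e in remaining:
--             return e
--     return last_found
-- ===== Notes on version B (the rewrite author's own statement) =====
-- stated objective: alternative
-- what changed: Instead of calling lst.index(elem, start) once per elem (each a scan of lst), B makes one eliminating pass over lst[start:] with a set of not-yet-seen elems, recording the last newly-found value; afterwards the first elem still unseen (in elems order) is returned, else the last-found value.
-- outside the precondition, e.g. on get_elem_max_first([1, 2], 0, []): A returns None, B returns None
import Mathlib
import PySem

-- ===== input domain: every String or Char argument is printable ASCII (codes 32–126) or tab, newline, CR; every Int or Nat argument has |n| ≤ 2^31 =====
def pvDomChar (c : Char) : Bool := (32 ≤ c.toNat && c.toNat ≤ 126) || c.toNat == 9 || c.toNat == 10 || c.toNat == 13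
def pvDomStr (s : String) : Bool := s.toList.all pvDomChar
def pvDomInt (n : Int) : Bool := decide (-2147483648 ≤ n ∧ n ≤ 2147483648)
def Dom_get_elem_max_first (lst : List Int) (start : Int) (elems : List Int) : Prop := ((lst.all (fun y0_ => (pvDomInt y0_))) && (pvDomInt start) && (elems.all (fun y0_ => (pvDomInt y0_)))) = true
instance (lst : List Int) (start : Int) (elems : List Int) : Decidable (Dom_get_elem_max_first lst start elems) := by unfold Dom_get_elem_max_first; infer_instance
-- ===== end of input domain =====

-- B replaces the per-elem lst.index scans by one eliminating pass over lst[start:] with a set (alternative algorithm).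
-- Equivalence is about the RETURN value; neither program mutates its arguments.

-- ===== PORT A =====
-- lst.index(x, start): first index ≥ clamped start with lst[i] = x, absolute; none = ValueError.
-- Ported as index? on the slice lst[start:] plus the clamped offset (exact: list.index's start is a slice bound).
def pyIndexFrom (lst : List Int) (start : Int) (x : Int) : Option Int :=
  match PySem.List.index? (PySem.List.slice lst (some start) none) x with
  | none => none
  | some k => some (((PySem.List.clampIdx lst.length start : Nat) : Int) + (k : Int))

-- A's loop over elems with state (max_first, elem_max_first); early return on ValueError.
def aLoop (lst : List Int) (start : Int) : List Int → Int → Option Int → Int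
  | [], _, em => em.getD 0   -- A returns None here (reached only with elems = []); Pre_ excludes it
  | e :: rest, maxFirst, em =>
    match pyIndexFrom lst start e with
    | none => e
    | some first =>
      if maxFirst < first then aLoop lst start rest first (some e)
      else aLoop lst start rest maxFirst em

def get_elem_max_first (lst : List Int) (start : Int) (elems : List Int) : Int :=
  aLoop lst start elems (-1) none

-- ===== PORT B =====
-- the eliminating pass over lst[start:]: state (remaining, last_found)
def bScan : List Int → PySem.Set Int → Option Int → PySem.Set Int × Option Int
  | [], rem, lf => (rem, lf)
  | v :: vs, rem, lf =>
    if PySem.Set.contains rem v then bScan vs (PySem.Set.discard rem v) (some v)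
    else bScan vs rem lf

-- the second loop: first elem still in remaining
def bFind (rem : PySem.Set Int) : List Int → Option Int
  | [] => none
  | e :: es => if PySem.Set.contains rem e then some e else bFind rem es

def get_elem_max_first_alt (lst : List Int) (start : Int) (elems : List Int) : Int :=
  match bFind (bScan (PySem.List.slice lst (some start) none) (PySem.Set.ofList elems) none).1 elems with
  | some e => e
  | none => (bScan (PySem.List.slice lst (some start) none) (PySem.Set.ofList elems) none).2.getD 0
  -- last_found is None only with elems = []; Pre_ excludes it

-- ===== PRECONDITION & SPEC =====
-- Pre_ excludes elems = []: there A returns None, which is not an Int.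
def Pre_get_elem_max_first (lst : List Int) (start : Int) (elems : List Int) : Prop := elems ≠ []
instance (lst : List Int) (start : Int) (elems : List Int) : Decidable (Pre_get_elem_max_first lst start elems) := by unfold Pre_get_elem_max_first; infer_instance
def pvWitness_get_elem_max_first : List Int × Int × List Int := ([3, 1, 2, 1], 1, [1, 2, 5])

def Spec_get_elem_max_first (lst : List Int) (start : Int) (elems : List Int) (out : Int) : Prop := out = get_elem_max_first_alt lst start elems
instance (lst : List Int) (start : Int) (elems : List Int) (out : Int) : Decidable (Spec_get_elem_max_first lst start elems out) := by unfold Spec_get_elem_max_first; infer_instance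

-- ===== CLAIM (what is proved, stated in full; the proofs are below) =====
def Claim_equal_get_elem_max_first : Prop := ∀ (lst : List Int) (start : Int) (elems : List Int), Dom_get_elem_max_first lst start elems → Pre_get_elem_max_first lst start elems → Spec_get_elem_max_first lst start elems (get_elem_max_first lst start elems)

-- ===== LEMMAS AND PROOFS =====

-- "v is an element of R occurring in tail whose first occurrence is farthest"
def Best (R tail : List Int) (v : Int) : Prop :=
  v ∈ R ∧ ∃ kv, PySem.List.index? tail v = some kv ∧
    ∀ w ∈ R, ∀ kw, PySem.List.index? tail w = some kw → kw ≤ kv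

theorem pyIndexFrom_eq_none_iff (lst : List Int) (start x : Int) :
    pyIndexFrom lst start x = none ↔ x ∉ PySem.List.slice lst (some start) none := by
  rw [← PySem.List.index?_eq_none_iff (PySem.List.slice lst (some start) none) x]
  unfold pyIndexFrom
  cases PySem.List.index? (PySem.List.slice lst (some start) none) x <;> simp

theorem pyIndexFrom_eq_some (lst : List Int) (start x : Int) (k : Nat)
    (h : PySem.List.index? (PySem.List.slice lst (some start) none) x = some k) :
    pyIndexFrom lst start x =
      some (((PySem.List.clampIdx lst.length start : Nat) : Int) + (k : Int)) := by
  unfold pyIndexFrom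
  rw [h]

theorem Best_unique (R tail : List Int) (v1 v2 : Int)
    (h1 : Best R tail v1) (h2 : Best R tail v2) : v1 = v2 := by
  obtain ⟨hv1, k1, hk1, hmax1⟩ := h1
  obtain ⟨hv2, k2, hk2, hmax2⟩ := h2
  have h12 : k1 ≤ k2 := hmax2 v1 hv1 k1 hk1
  have h21 : k2 ≤ k1 := hmax1 v2 hv2 k2 hk2
  have hk : k1 = k2 := Nat.le_antisymm h12 h21
  obtain ⟨hlt1, hget1, -⟩ := PySem.List.getElem_of_index?_eq_some hk1
  obtain ⟨hlt2, hget2, -⟩ := PySem.List.getElem_of_index?_eq_some hk2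
  subst hk
  rw [← hget1, ← hget2]

-- A returns the first not-found elem
theorem aLoop_find_some (lst : List Int) (start : Int) (elems : List Int) (e : Int)
    (hf : elems.find? (fun w => decide (w ∉ PySem.List.slice lst (some start) none)) = some e) :
    ∀ (m : Int) (em : Option Int), aLoop lst start elems m em = e := by
  induction elems with
  | nil => simp at hf
  | cons h t ih =>
    intro m em
    by_cases hmem : h ∈ PySem.List.slice lst (some start) none
    · rw [List.find?_cons_of_neg (by simpa using hmem)] at hf
      have hne : pyIndexFrom lst start h ≠ none := by
        rw [Ne, pyIndexFrom_eq_none_iff]; simpa using hmem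
      obtain ⟨first, hfirst⟩ := Option.ne_none_iff_exists'.mp hne
      simp only [aLoop, hfirst]
      split <;> exact ih hf _ _
    · rw [List.find?_cons_of_pos (by simpa using hmem)] at hf
      have hnone : pyIndexFrom lst start h = none := by
        rw [pyIndexFrom_eq_none_iff]; exact hmem
      simp only [aLoop, hnone]
      exact Option.some_inj.mp hf

-- all-found case: A's loop keeps an element whose first occurrence is farthest so far
theorem aLoop_best (lst : List Int) (start : Int) (elems : List Int)
    (hall : ∀ w ∈ elems, w ∈ PySem.List.slice lst (some start) none) :
    ∀ (u : Int) (ku : Nat),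
      PySem.List.index? (PySem.List.slice lst (some start) none) u = some ku →
      Best (u :: elems) (PySem.List.slice lst (some start) none)
        (aLoop lst start elems (((PySem.List.clampIdx lst.length start : Nat) : Int) + (ku : Int)) (some u)) := by
  induction elems with
  | nil =>
    intro u ku hku
    refine ⟨by simp [aLoop], ku, hku, ?_⟩
    intro w hw kw hkw
    simp only [List.mem_cons, List.not_mem_nil, or_false] at hw
    subst hw
    rw [hku] at hkw
    exact le_of_eq (Option.some.inj hkw).symm
  | cons e rest ih =>
    intro u ku hku
    have he : e ∈ PySem.List.slice lst (some start) none := hall e (by simp)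
    obtain ⟨ke, hke⟩ :=
      Option.isSome_iff_exists.mp ((PySem.List.index?_isSome_iff _ _).mpr he)
    have hallrest : ∀ w ∈ rest, w ∈ PySem.List.slice lst (some start) none :=
      fun w hw => hall w (by simp [hw])
    simp only [aLoop, pyIndexFrom_eq_some lst start e ke hke]
    by_cases hlt : ((PySem.List.clampIdx lst.length start : Nat) : Int) + (ku : Int) <
        ((PySem.List.clampIdx lst.length start : Nat) : Int) + (ke : Int)
    · rw [if_pos hlt]
      have hkult : ku < ke := by omega
      obtain ⟨hv, kv, hkv, hmax⟩ := ih hallrest e ke hke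
      refine ⟨?_, kv, hkv, ?_⟩
      · simp only [List.mem_cons] at hv ⊢
        exact Or.inr hv
      · intro w hw kw hkw
        have hekv : ke ≤ kv := hmax e (by simp) ke hke
        simp only [List.mem_cons] at hw
        rcases hw with h | h | h
        · subst h
          rw [hku] at hkw
          have : ku = kw := Option.some.inj hkw
          omega
        · subst h; exact hmax w (by simp) kw hkw
        · exact hmax w (by simp [h]) kw hkw
    · rw [if_neg hlt]
      have hkele : ke ≤ ku := by omega
      obtain ⟨hv, kv, hkv, hmax⟩ := ih hallrest u ku hku
      refine ⟨?_, kv, hkv, ?_⟩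
      · simp only [List.mem_cons] at hv ⊢
        rcases hv with h | h
        · exact Or.inl h
        · exact Or.inr (Or.inr h)
      · intro w hw kw hkw
        have hukv : ku ≤ kv := hmax u (by simp) ku hku
        simp only [List.mem_cons] at hw
        rcases hw with h | h | h
        · subst h; exact hmax w (by simp) kw hkw
        · subst h
          rw [hke] at hkw
          have : ke = kw := Option.some.inj hkw
          omega
        · exact hmax w (by simp [h]) kw hkw

-- membership in bScan's remaining set
theorem bScan_rem_mem (tail : List Int) :
    ∀ (R : PySem.Set Int) (lf : Option Int) (x : Int),
      x ∈ (bScan tail R lf).1 ↔ x ∈ R ∧ x ∉ tail := by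
  induction tail with
  | nil => intro R lf x; simp [bScan]
  | cons t ts ih =>
    intro R lf x
    by_cases ht : t ∈ R
    · simp only [bScan, if_pos ((PySem.Set.contains_iff _ _).mpr ht)]
      rw [ih]
      constructor
      · rintro ⟨hx, hnx⟩
        rw [PySem.Set.mem_discard] at hx
        exact ⟨hx.1, by simp [hx.2, hnx]⟩
      · rintro ⟨hx, hnx⟩
        simp only [List.mem_cons, not_or] at hnx
        exact ⟨(PySem.Set.mem_discard _ _ _).mpr ⟨hx, hnx.1⟩, hnx.2⟩
    · simp only [bScan, if_neg (fun h => ht ((PySem.Set.contains_iff _ _).mp h))]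
      rw [ih]
      constructor
      · rintro ⟨hx, hnx⟩
        refine ⟨hx, ?_⟩
        simp only [List.mem_cons, not_or]
        exact ⟨fun h => ht (h ▸ hx), hnx⟩
      · rintro ⟨hx, hnx⟩
        simp only [List.mem_cons, not_or] at hnx
        exact ⟨hx, hnx.2⟩

-- bScan's last_found when nothing of R occurs in tail
theorem bScan_lf_of_disjoint (tail : List Int) :
    ∀ (R : PySem.Set Int) (lf : Option Int), (∀ x ∈ R, x ∉ tail) →
      (bScan tail R lf).2 = lf := by
  induction tail with
  | nil => intro R lf _; simp [bScan]
  | cons t ts ih =>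
    intro R lf hdis
    have ht : t ∉ R := fun h => hdis t h (by simp)
    simp only [bScan, if_neg (fun h => ht ((PySem.Set.contains_iff _ _).mp h))]
    exact ih R lf (fun x hx => by
      have := hdis x hx; simp only [List.mem_cons, not_or] at this; exact this.2)

-- bScan's last_found is a Best element when some element of R occurs in tail
theorem bScan_lf_best (tail : List Int) :
    ∀ (R : PySem.Set Int) (lf : Option Int), (∃ x ∈ R, x ∈ tail) →
      ∃ v, (bScan tail R lf).2 = some v ∧ Best R tail v := by
  induction tail with
  | nil => rintro R lf ⟨x, -, hx⟩; simp at hx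
  | cons t ts ih =>
    intro R lf hex
    by_cases ht : t ∈ R
    · simp only [bScan, if_pos ((PySem.Set.contains_iff _ _).mpr ht)]
      by_cases hex' : ∃ x ∈ PySem.Set.discard R t, x ∈ ts
      · obtain ⟨v, hv, hvR, kv, hkv, hmax⟩ := ih (PySem.Set.discard R t) (some t) hex'
        have hvt : v ≠ t := ((PySem.Set.mem_discard _ _ _).mp hvR).2
        refine ⟨v, hv, ((PySem.Set.mem_discard _ _ _).mp hvR).1, kv + 1, ?_, ?_⟩
        · rw [PySem.List.index?_cons_of_ne ts hvt.symm, hkv]; rfl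
        · intro w hw kw hkw
          by_cases hwt : w = t
          · subst hwt
            rw [PySem.List.index?_cons_self] at hkw
            injection hkw with h0
            omega
          · rw [PySem.List.index?_cons_of_ne ts (fun h => hwt h.symm)] at hkw
            obtain ⟨kw', hkw', rfl⟩ := Option.map_eq_some_iff.mp hkw
            have := hmax w ((PySem.Set.mem_discard _ _ _).mpr ⟨hw, hwt⟩) kw' hkw'
            omega
      · push Not at hex'
        refine ⟨t, ?_, ht, 0, PySem.List.index?_cons_self t ts, ?_⟩
        · rw [bScan_lf_of_disjoint ts _ _ hex']
        · intro w hw kw hkw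
          by_cases hwt : w = t
          · subst hwt
            rw [PySem.List.index?_cons_self] at hkw
            injection hkw with h0
            omega
          · rw [PySem.List.index?_cons_of_ne ts (fun h => hwt h.symm)] at hkw
            obtain ⟨kw', hkw', rfl⟩ := Option.map_eq_some_iff.mp hkw
            have hwts : w ∈ ts := (PySem.List.index?_isSome_iff _ _).mp (by rw [hkw']; rfl)
            exact absurd hwts (hex' w ((PySem.Set.mem_discard _ _ _).mpr ⟨hw, hwt⟩))
    · simp only [bScan, if_neg (fun h => ht ((PySem.Set.contains_iff _ _).mp h))]
      have hex' : ∃ x ∈ R, x ∈ ts := by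
        obtain ⟨x, hxR, hxt⟩ := hex
        have hxne : x ≠ t := fun h => ht (h ▸ hxR)
        exact ⟨x, hxR, by simpa [hxne] using hxt⟩
      obtain ⟨v, hv, hvR, kv, hkv, hmax⟩ := ih R lf hex'
      have hvt : v ≠ t := fun h => ht (h ▸ hvR)
      refine ⟨v, hv, hvR, kv + 1, ?_, ?_⟩
      · rw [PySem.List.index?_cons_of_ne ts hvt.symm, hkv]; rfl
      · intro w hw kw hkw
        have hwt : w ≠ t := fun h => ht (h ▸ hw)
        rw [PySem.List.index?_cons_of_ne ts (fun h => hwt h.symm)] at hkw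
        obtain ⟨kw', hkw', rfl⟩ := Option.map_eq_some_iff.mp hkw
        have := hmax w hw kw' hkw'
        omega

-- bFind over elems = find? of "not found in tail", given the scanned remaining set
theorem bFind_eq_find? (lst : List Int) (start : Int) (elems : List Int) :
    ∀ es : List Int, (∀ e ∈ es, e ∈ elems) →
      bFind (bScan (PySem.List.slice lst (some start) none) (PySem.Set.ofList elems) none).1 es =
        es.find? (fun w => decide (w ∉ PySem.List.slice lst (some start) none)) := by
  intro es hes
  induction es with
  | nil => simp [bFind]
  | cons e t ih =>
    have hmem : e ∈ (bScan (PySem.List.slice lst (some start) none) (PySem.Set.ofList elems) none).1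
        ↔ e ∉ PySem.List.slice lst (some start) none := by
      rw [bScan_rem_mem]
      simp [PySem.Set.mem_ofList, hes e (by simp)]
    by_cases h : e ∈ PySem.List.slice lst (some start) none
    · rw [List.find?_cons_of_neg (by simpa using h)]
      simp only [bFind, if_neg (fun hc => (hmem.mp ((PySem.Set.contains_iff _ _).mp hc)) h)]
      exact ih (fun w hw => hes w (by simp [hw]))
    · rw [List.find?_cons_of_pos (by simpa using h)]
      simp only [bFind, if_pos ((PySem.Set.contains_iff _ _).mpr (hmem.mpr h))]

-- ===== VERDICT (by name: the statement is the Claim_ definition above) =====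
theorem get_elem_max_first_spec : Claim_equal_get_elem_max_first := by
  intro lst start elems _ hpre
  unfold Spec_get_elem_max_first get_elem_max_first get_elem_max_first_alt
  rw [bFind_eq_find? lst start elems elems (fun _ h => h)]
  cases hf : elems.find? (fun w => decide (w ∉ PySem.List.slice lst (some start) none)) with
  | some e => exact aLoop_find_some lst start elems e hf (-1) none
  | none =>
    have hall : ∀ w ∈ elems, w ∈ PySem.List.slice lst (some start) none := by
      intro w hw
      have := List.find?_eq_none.mp hf w hw
      simpa using this
    cases elems with
    | nil => exact absurd rfl hpre
    | cons e0 rest =>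
      have he0 : e0 ∈ PySem.List.slice lst (some start) none := hall e0 (by simp)
      obtain ⟨k0, hk0⟩ :=
        Option.isSome_iff_exists.mp ((PySem.List.index?_isSome_iff _ _).mpr he0)
      have hbA := aLoop_best lst start rest (fun w hw => hall w (by simp [hw])) e0 k0 hk0
      have hexB : ∃ x ∈ PySem.Set.ofList (e0 :: rest), x ∈ PySem.List.slice lst (some start) none :=
        ⟨e0, (PySem.Set.mem_ofList _ _).mpr (by simp), he0⟩
      obtain ⟨v, hv, hvBest⟩ := bScan_lf_best (PySem.List.slice lst (some start) none)
        (PySem.Set.ofList (e0 :: rest)) none hexB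
      have hvBest' : Best (e0 :: rest) (PySem.List.slice lst (some start) none) v := by
        obtain ⟨h1, k, h2, h3⟩ := hvBest
        exact ⟨(PySem.Set.mem_ofList _ _).mp h1, k, h2,
          fun w hw => h3 w ((PySem.Set.mem_ofList _ _).mpr hw)⟩
      rw [hv]
      simp only [aLoop, pyIndexFrom_eq_some lst start e0 k0 hk0, Option.getD_some]
      rw [if_pos (by omega)]
      exact Best_unique _ _ _ _ hbA hvBest'
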